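-- pv_equiv track=rewrite | github.com/djsbalakrishnan/InterviewQuestions | Stacks/MaxAndMin/solution.py | NLL
-- ===== SOURCE A (Python) =====
-- def NLL(A):
--     nll = [-1]*len(A)
--     stack = [0]
--     for i in range(1, len(A)):
--         ele = A[i]
--         while len(stack) > 0 and ele >= A[stack[-1]]:
--             stack.pop()
--         if len(stack) > 0:
--             nll[i] = stack[-1]
--         else:
--             nll[i] = -1
--         stack.append(i)
--
--     return nll
-- ===== SOURCE B (Python) =====
-- def NLL(A):
--     res = []
--     for i in range(len(A)):
--         j = i - 1
--         while j >= 0 and A[j] <= A[i]: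
--             j -= 1
--         res.append(j)
--     return res
-- ===== Notes on version B (the rewrite author's own statement) =====
-- stated objective: simpler
-- what changed: Replaces the monotonic-stack single pass with a direct nested leftward scan: for each i scan j from i-1 downward to the first j with A[j] > A[i], appending j (or -1) with no auxiliary stack or in-place -1 array.
import Mathlib
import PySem

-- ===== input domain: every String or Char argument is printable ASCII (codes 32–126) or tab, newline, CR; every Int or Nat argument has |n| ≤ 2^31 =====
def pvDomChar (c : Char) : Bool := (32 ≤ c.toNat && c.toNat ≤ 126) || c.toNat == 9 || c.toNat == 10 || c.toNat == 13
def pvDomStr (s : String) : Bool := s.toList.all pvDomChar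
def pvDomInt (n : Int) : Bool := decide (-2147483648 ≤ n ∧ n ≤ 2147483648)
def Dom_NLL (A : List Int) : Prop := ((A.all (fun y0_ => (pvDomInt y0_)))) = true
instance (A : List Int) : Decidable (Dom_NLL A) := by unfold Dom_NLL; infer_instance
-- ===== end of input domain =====

-- B is a plain nested leftward scan (no stack); A is the original monotonic-stack pass.

-- ===== PORT A =====
-- the 'while len(stack) > 0 and ele >= A[stack[-1]]: stack.pop()' loop
-- (stack is kept top-first; Python keeps the top at the end of the list)
def pvPops (A : List Int) (ele : Int) : List Nat → List Nat
  | [] => []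
  | t :: rest => if ele ≥ A.getD t 0 then pvPops A ele rest else t :: rest

-- one body of 'for i in range(1, len(A))'
def pvStep (A : List Int) (st : List Int × List Nat) (i : Nat) : List Int × List Nat :=
  let ele := A.getD i 0
  let s' := pvPops A ele st.2
  let v : Int := match s' with
    | [] => -1
    | t :: _ => (t : Int)
  (st.1.set i v, i :: s')

def NLL (A : List Int) : List Int :=
  ((List.range' 1 (A.length - 1)).foldl (pvStep A) (List.replicate A.length (-1), [0])).1

-- ===== PORT B =====
-- the 'while j >= 0 and A[j] <= A[i]: j -= 1' loop, scanning j = n-1, n-2, …, 0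
def pvFindJ (A : List Int) (x : Int) : Nat → Int
  | 0 => -1
  | n + 1 => if A.getD n 0 > x then (n : Int) else pvFindJ A x n

def NLL_alt (A : List Int) : List Int :=
  (List.range A.length).map (fun i => pvFindJ A (A.getD i 0) i)

-- ===== PRECONDITION & SPEC =====
def Spec_NLL (A : List Int) (out : List Int) : Prop := out = NLL_alt A
instance (A : List Int) (out : List Int) : Decidable (Spec_NLL A out) := by unfold Spec_NLL; infer_instance

-- ===== CLAIM (what is proved, stated in full; the proofs are below) =====
def Claim_equal_NLL : Prop := ∀ (A : List Int), Dom_NLL A → Spec_NLL A (NLL A)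

-- ===== LEMMAS AND PROOFS =====

-- the stack is always a chain: each entry's nearest-greater-to-the-left is the entry below it
inductive pvGood (A : List Int) : List Nat → Prop
  | single (j : Nat) (h : pvFindJ A (A.getD j 0) j = -1) : pvGood A [j]
  | cons (j k : Nat) (rest : List Nat)
      (h : pvFindJ A (A.getD j 0) j = (k : Int))
      (hg : pvGood A (k :: rest)) : pvGood A (j :: k :: rest)

theorem pvFindJ_neg_all {A : List Int} {x : Int} :
    ∀ n, pvFindJ A x n = -1 → ∀ m, m < n → A.getD m 0 ≤ x := by
  intro n
  induction n with
  | zero => intro _ m hm; omega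
  | succ k ih =>
    intro h m hm
    rw [pvFindJ] at h
    split at h
    · exfalso; omega
    · rename_i hle
      rcases Nat.lt_succ_iff_lt_or_eq.mp hm with h' | h'
      · exact ih h m h'
      · subst h'; omega

theorem pvFindJ_pos {A : List Int} {x : Int} :
    ∀ n (k : Nat), pvFindJ A x n = (k : Int) →
      k < n ∧ A.getD k 0 > x ∧ ∀ m, k < m → m < n → A.getD m 0 ≤ x := by
  intro n
  induction n with
  | zero => intro k h; rw [pvFindJ] at h; omega
  | succ j ih =>
    intro k h
    rw [pvFindJ] at h
    split at h
    · rename_i hgt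
      have hk : k = j := by exact_mod_cast h.symm
      subst hk
      exact ⟨Nat.lt_succ_self _, hgt, fun m hm hm' => by omega⟩
    · rename_i hle
      obtain ⟨h1, h2, h3⟩ := ih k h
      refine ⟨by omega, h2, ?_⟩
      intro m hm hm'
      rcases Nat.lt_succ_iff_lt_or_eq.mp hm' with h' | h'
      · exact h3 m hm h'
      · subst h'; omega

-- if every index in [c, j) holds a value ≤ x, the scan from j equals the scan from c
theorem pvFindJ_skip {A : List Int} {x : Int} :
    ∀ j c, c ≤ j → (∀ m, c ≤ m → m < j → A.getD m 0 ≤ x) →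
      pvFindJ A x j = pvFindJ A x c := by
  intro j
  induction j with
  | zero => intro c hc _; interval_cases c; rfl
  | succ j ih =>
    intro c hc hall
    rcases Nat.lt_succ_iff_lt_or_eq.mp (Nat.lt_succ_of_le hc) with h | h
    · have hle : A.getD j 0 ≤ x := hall j (by omega) (by omega)
      rw [pvFindJ, if_neg (by omega : ¬ A.getD j 0 > x)]
      exact ih c (by omega) (fun m hm hm' => hall m hm (by omega))
    · subst h; rfl

-- popping a chain computes exactly the nested scan from the chain's head downward
theorem pvPops_spec {A : List Int} (ele : Int) :
    ∀ {s : List Nat}, pvGood A s →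
      (pvPops A ele s = [] ∧ pvFindJ A ele (s.headD 0 + 1) = -1) ∨
      (∃ t rest', pvPops A ele s = t :: rest' ∧ pvFindJ A ele (s.headD 0 + 1) = (t : Int) ∧
        pvGood A (t :: rest')) := by
  intro s hg
  induction hg with
  | single j h =>
    simp only [List.headD_cons]
    by_cases hpop : ele ≥ A.getD j 0
    · left
      refine ⟨by rw [pvPops, if_pos hpop]; rfl, ?_⟩
      rw [pvFindJ, if_neg (by omega : ¬ A.getD j 0 > ele)]
      have hall := pvFindJ_neg_all j h
      rw [pvFindJ_skip j 0 (by omega)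
        (fun m _ hmj => le_trans (hall m hmj) (by omega))]
      rfl
    · right
      exact ⟨j, [], by rw [pvPops, if_neg hpop],
        by rw [pvFindJ, if_pos (by omega : A.getD j 0 > ele)],
        pvGood.single j h⟩
  | cons j k rest h hg ih =>
    simp only [List.headD_cons] at ih ⊢
    by_cases hpop : ele ≥ A.getD j 0
    · have hstep : pvPops A ele (j :: k :: rest) = pvPops A ele (k :: rest) := by
        rw [pvPops, if_pos hpop]
      obtain ⟨hk, hjgt, hbetween⟩ := pvFindJ_pos j k h
      have hskip : pvFindJ A ele (j + 1) = pvFindJ A ele (k + 1) := by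
        rw [pvFindJ, if_neg (by omega : ¬ A.getD j 0 > ele)]
        exact pvFindJ_skip j (k + 1) (by omega)
          (fun m hm hm' => le_trans (hbetween m (by omega) hm') (by omega))
      rcases ih with ⟨he, hf⟩ | ⟨t, rest'', he, hf, hgood⟩
      · exact Or.inl ⟨hstep.trans he, hskip.trans hf⟩
      · exact Or.inr ⟨t, rest'', hstep.trans he, hskip.trans hf, hgood⟩
    · right
      exact ⟨j, k :: rest, by rw [pvPops, if_neg hpop],
        by rw [pvFindJ, if_pos (by omega : A.getD j 0 > ele)],
        pvGood.cons j k rest h hg⟩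

-- the nll list after processing indices 1, …, m (correct up to index m)
def pvNllAt (A : List Int) (m : Nat) : List Int :=
  (List.range A.length).map (fun t => if t < m + 1 then pvFindJ A (A.getD t 0) t else -1)

theorem pvFindJ_zero {A : List Int} {x : Int} : pvFindJ A x 0 = -1 := rfl

theorem pvNllAt_zero (A : List Int) : pvNllAt A 0 = List.replicate A.length (-1) := by
  apply List.ext_getElem
  · simp [pvNllAt]
  · intro i h1 h2
    simp only [pvNllAt, List.getElem_map, List.getElem_range, List.getElem_replicate]
    split
    · rename_i h; have hi : i = 0 := by omega
      subst hi; exact pvFindJ_zero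
    · rfl

theorem pvNllAt_set (A : List Int) (m : Nat) (_hm : m + 1 < A.length) :
    (pvNllAt A m).set (m + 1) (pvFindJ A (A.getD (m + 1) 0) (m + 1)) = pvNllAt A (m + 1) := by
  apply List.ext_getElem
  · simp [pvNllAt]
  · intro i h1 h2
    simp only [pvNllAt, List.length_map, List.length_range] at h1 h2 ⊢
    rw [List.getElem_set]
    simp only [List.getElem_map, List.getElem_range]
    split
    · rename_i h; subst h; simp
    · rename_i h
      split <;> split <;> first | rfl | omega

-- the loop invariant, by induction on the number of processed iterations
theorem pvLoop_inv (A : List Int) :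
    ∀ m, m + 1 ≤ A.length →
      ∃ s, (List.range' 1 m).foldl (pvStep A) (List.replicate A.length (-1), [0]) =
            (pvNllAt A m, s) ∧ pvGood A s ∧ s.headD 0 = m := by
  intro m
  induction m with
  | zero =>
    intro _
    exact ⟨[0], by simp [pvNllAt_zero], pvGood.single 0 pvFindJ_zero, rfl⟩
  | succ m ih =>
    intro hlen
    obtain ⟨s, hfold, hgood, hs⟩ := ih (by omega)
    have hrange : List.range' 1 (m + 1) = List.range' 1 m ++ [1 + 1 * m] :=
      List.range'_concat
    rw [hrange, List.foldl_append, hfold]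
    have h1m : 1 + 1 * m = m + 1 := by omega
    rw [h1m]
    simp only [List.foldl_cons, List.foldl_nil]
    rcases pvPops_spec (A := A) (A.getD (m + 1) 0) hgood with ⟨he, hf⟩ | ⟨t, rest', he, hf, hgoodt⟩
    · rw [hs] at hf
      refine ⟨[m + 1], ?_, pvGood.single (m + 1) hf, List.headD_cons⟩
      simp only [pvStep, he]
      rw [← hf, pvNllAt_set A m (by omega)]
    · rw [hs] at hf
      refine ⟨(m + 1) :: t :: rest', ?_, pvGood.cons (m + 1) t rest' hf hgoodt, List.headD_cons⟩
      simp only [pvStep, he]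
      rw [show ((t : Int)) = pvFindJ A (A.getD (m + 1) 0) (m + 1) from hf.symm,
        pvNllAt_set A m (by omega)]

-- ===== VERDICT (by name: the statement is the Claim_ definition above) =====
theorem NLL_spec : Claim_equal_NLL := by
  intro A _
  unfold Spec_NLL NLL NLL_alt
  rcases Nat.eq_zero_or_pos A.length with h0 | hpos
  · simp [h0]
  · obtain ⟨s, hfold, -, -⟩ := pvLoop_inv A (A.length - 1) (by omega)
    have hl : A.length - 1 + 1 = A.length := by omega
    rw [hfold]
    simp only [pvNllAt]
    apply List.map_congr_left
    intro t ht
    simp only [List.mem_range] at ht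
    rw [if_pos (by omega)]
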